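-- pv_equiv track=rewrite | github.com/dardevelin/pre-commit-commit-msg-linter-hook | src/commit_msg/hook.py | title_starts_with_commit_type
-- ===== SOURCE A (Python) =====
-- from typing import List
--
-- def title_starts_with_commit_type(commit_message: List[str]) -> tuple:
--     """
--     When the title starts with the commit type.
--     Returns: (True, None)
--     Status: True
--     Hint: Not Provided
--
--     When the title does not start with the commit type.
--     Returns: (False, List[Valid Commit Types])
--     Status: False
--     Hint: List of valid commit types
--     """
--     valid_commit_types = ["feat", "fix", "refactor", "style",
--                           "docs", "test", "chore", "revert"]
--
--     title = commit_message[0]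
--     for commit_type in valid_commit_types:
--         if title.startswith(f"{commit_type}:"):
--             return (True, None)
--
--     return (False, valid_commit_types)
-- ===== SOURCE B (Python) =====
-- def title_starts_with_commit_type(commit_message):
--     valid_commit_types = ["feat", "fix", "refactor", "style",
--                           "docs", "test", "chore", "revert"]
--     head, sep, _ = commit_message[0].partition(":")
--     if sep and head in valid_commit_types:
--         return (True, None)
--     return (False, valid_commit_types)
-- ===== Notes on version B (the rewrite author's own statement) =====
-- stated objective: idiomatic
-- what changed: B parses the title once with partition(':') and tests the prefix for membership in the valid-types list, instead of A's loop of eight startswith prefix scans.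
import Mathlib
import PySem

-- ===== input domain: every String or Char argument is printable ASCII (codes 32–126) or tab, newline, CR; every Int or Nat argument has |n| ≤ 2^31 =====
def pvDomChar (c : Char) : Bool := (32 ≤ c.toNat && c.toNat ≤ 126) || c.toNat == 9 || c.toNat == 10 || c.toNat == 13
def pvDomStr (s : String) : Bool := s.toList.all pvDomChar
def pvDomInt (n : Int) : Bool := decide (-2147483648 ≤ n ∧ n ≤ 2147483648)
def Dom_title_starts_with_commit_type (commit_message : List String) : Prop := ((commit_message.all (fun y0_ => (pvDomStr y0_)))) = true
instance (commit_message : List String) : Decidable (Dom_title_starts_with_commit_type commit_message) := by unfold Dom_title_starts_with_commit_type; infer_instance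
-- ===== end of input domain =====

-- B parses the title once with partition(":") and a membership test instead of A's eight startswith scans (idiomatic).


-- ===== PORT A =====
def pvValidTypes : List String := ["feat", "fix", "refactor", "style", "docs", "test", "chore", "revert"]

-- the for-loop with early return, as structural recursion over the types
def pvLoopA (title : String) : List String → Bool × Option (List String)
  | [] => (false, some pvValidTypes)
  | t :: rest =>
    if PySem.Str.startswith title (t ++ ":") then (true, none)
    else pvLoopA title rest

def title_starts_with_commit_type (commit_message : List String) : Bool × Option (List String) :=
  let title := (PySem.List.pyGet? commit_message 0).getD ""   -- commit_message[0]; none (IndexError) is outside Pre_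
  pvLoopA title pvValidTypes

-- ===== PORT B =====
def title_starts_with_commit_type_alt (commit_message : List String) : Bool × Option (List String) :=
  let title := (PySem.List.pyGet? commit_message 0).getD ""   -- commit_message[0]; none (IndexError) is outside Pre_
  let cs := title.toList
  -- title.partition(":"): head = text before the first ':', sep nonempty iff ':' occurs (exact for a 1-char separator)
  let head := cs.takeWhile (· ≠ ':')
  if cs.contains ':' && pvValidTypes.contains (String.ofList head) then (true, none)
  else (false, some pvValidTypes)

-- ===== PRECONDITION & SPEC =====
-- Pre_ excludes only the empty list, on which A's commit_message[0] raises IndexError (B raises there too).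
def Pre_title_starts_with_commit_type (commit_message : List String) : Prop := commit_message ≠ []
instance (commit_message : List String) : Decidable (Pre_title_starts_with_commit_type commit_message) := by unfold Pre_title_starts_with_commit_type; infer_instance
def pvWitness_title_starts_with_commit_type : List String := ["feat: add thing"]

def Spec_title_starts_with_commit_type (commit_message : List String) (out : Bool × Option (List String)) : Prop := out = title_starts_with_commit_type_alt commit_message
instance (commit_message : List String) (out : Bool × Option (List String)) : Decidable (Spec_title_starts_with_commit_type commit_message out) := by unfold Spec_title_starts_with_commit_type; infer_instance

-- ===== CLAIM (what is proved, stated in full; the proofs are below) =====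
def Claim_equal_title_starts_with_commit_type : Prop := ∀ (commit_message : List String), Dom_title_starts_with_commit_type commit_message → Pre_title_starts_with_commit_type commit_message → Spec_title_starts_with_commit_type commit_message (title_starts_with_commit_type commit_message)

-- ===== LEMMAS AND PROOFS =====

-- key characterisation: for a colon-free prefix ts, "ts ++ ':' is a prefix of cs"
-- is exactly "cs contains ':' and the text before the first ':' is ts"
theorem pv_prefix_colon_iff (ts cs : List Char) (hts : ':' ∉ ts) :
    (ts ++ [':']) <+: cs ↔ (':' ∈ cs ∧ cs.takeWhile (· ≠ ':') = ts) := by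
  induction ts generalizing cs with
  | nil =>
    cases cs with
    | nil => simp
    | cons c cs' =>
      by_cases hc : c = ':'
      · subst hc; simp
      · simp [List.cons_prefix_cons, hc, Ne.symm hc]
  | cons a as ih =>
    have ha : a ≠ ':' := fun h => hts (by simp [h])
    have has : ':' ∉ as := fun h => hts (by simp [h])
    cases cs with
    | nil => simp
    | cons c cs' =>
      by_cases hc : c = ':'
      · subst hc
        simp only [List.cons_append, List.cons_prefix_cons, List.takeWhile_cons]
        constructor
        · rintro ⟨h, -⟩; exact (ha h).elim
        · rintro ⟨-, h⟩
          simp at h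
      · simp only [List.cons_append, List.cons_prefix_cons, List.takeWhile_cons,
          List.mem_cons, show (decide (c ≠ ':')) = true from by simp [hc]]
        rw [ih cs' has]
        constructor
        · rintro ⟨rfl, hm, htk⟩
          refine ⟨Or.inr hm, ?_⟩
          rw [if_pos trivial, htk]
        · rintro ⟨hm, htk⟩
          simp only [if_true, List.cons.injEq] at htk
          obtain ⟨rfl, htk⟩ := htk
          refine ⟨rfl, ?_, htk⟩
          rcases hm with h | h
          · exact absurd h.symm ha
          · exact h

-- the loop equals B's single-parse test, for any colon-free list of types
theorem pv_loop_eq (title : String) (ts : List String) (hts : ∀ t ∈ ts, ':' ∉ t.toList) :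
    pvLoopA title ts =
      (if (':' ∈ title.toList ∧ String.ofList (title.toList.takeWhile (· ≠ ':')) ∈ ts)
       then ((true : Bool), (none : Option (List String)))
       else (false, some pvValidTypes)) := by
  induction ts with
  | nil => simp [pvLoopA]
  | cons t rest ih =>
    have ht : ':' ∉ t.toList := hts t (by simp)
    rw [pvLoopA, ih (fun u h => hts u (by simp [h]))]
    have hiff : PySem.Str.startswith title (t ++ ":") = true ↔
        (':' ∈ title.toList ∧ title.toList.takeWhile (· ≠ ':') = t.toList) := by
      rw [PySem.Str.startswith_eq, PySem.Chars.startswith_iff]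
      simpa using pv_prefix_colon_iff t.toList title.toList ht
    have hof : ∀ l : List Char, String.ofList l = t ↔ l = t.toList := by
      intro l
      constructor
      · intro h; rw [← h, String.toList_ofList]
      · intro h; rw [h]; exact String.ofList_toList
    by_cases hs : PySem.Str.startswith title (t ++ ":") = true
    · obtain ⟨hm, htk⟩ := hiff.mp hs
      rw [if_pos hs, if_pos ⟨hm, List.mem_cons.mpr (Or.inl ((hof _).mpr htk))⟩]
    · rw [if_neg hs]
      have hne : ¬ (':' ∈ title.toList ∧ title.toList.takeWhile (· ≠ ':') = t.toList) :=
        fun h => hs (hiff.mpr h)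
      by_cases hm : ':' ∈ title.toList
      · have : String.ofList (title.toList.takeWhile (· ≠ ':')) ≠ t :=
          fun h => hne ⟨hm, (hof _).mp h⟩
        congr 1
        simp only [List.mem_cons, eq_iff_iff]
        constructor
        · rintro ⟨h1, h2⟩; exact ⟨h1, Or.inr h2⟩
        · rintro ⟨h1, h2 | h2⟩
          · exact absurd h2 this
          · exact ⟨h1, h2⟩
      · rw [if_neg (fun h => hm h.1), if_neg (fun h => hm h.1)]

-- ===== VERDICT (by name: the statement is the Claim_ definition above) =====
theorem title_starts_with_commit_type_spec : Claim_equal_title_starts_with_commit_type := by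
  intro commit_message _ _
  unfold Spec_title_starts_with_commit_type
  unfold title_starts_with_commit_type title_starts_with_commit_type_alt
  rw [pv_loop_eq _ pvValidTypes (by decide)]
  simp only [Bool.and_eq_true, List.contains_eq_mem, decide_eq_true_eq]
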